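-- pv_equiv track=rewrite | github.com/horimpark/code-playground | codewars/6kyu/Sequence of squared digits.py | squared_digits_series
-- ===== SOURCE A (Python) =====
-- def squared_digits_series(n):
--     result_sum = 0
--     idx = 0
--     count = 0
--
--     while count < n:
--         if idx & (idx + 1) == 0:
--             s = (idx + 1) * 10 + 1
--             repeats = min(idx + 1, n - count)
--             result_sum += s * repeats
--             count += repeats
--
--         idx += 1
--
--     return result_sum
-- ===== SOURCE B (Python) =====
-- def squared_digits_series(n):
--     total = 0
--     count = 0
--     p = 1
--     while count < n:
--         r = min(p, n - count)
--         total += (10 * p + 1) * r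
--         count += r
--         p *= 2
--     return total
-- ===== Notes on version B (the rewrite author's own statement) =====
-- stated objective: faster
-- what changed: B iterates directly over the successive power-of-two block sizes, one step per block, instead of A's walk over every index idx testing idx&(idx+1)==0 for a block boundary.
import Mathlib
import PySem

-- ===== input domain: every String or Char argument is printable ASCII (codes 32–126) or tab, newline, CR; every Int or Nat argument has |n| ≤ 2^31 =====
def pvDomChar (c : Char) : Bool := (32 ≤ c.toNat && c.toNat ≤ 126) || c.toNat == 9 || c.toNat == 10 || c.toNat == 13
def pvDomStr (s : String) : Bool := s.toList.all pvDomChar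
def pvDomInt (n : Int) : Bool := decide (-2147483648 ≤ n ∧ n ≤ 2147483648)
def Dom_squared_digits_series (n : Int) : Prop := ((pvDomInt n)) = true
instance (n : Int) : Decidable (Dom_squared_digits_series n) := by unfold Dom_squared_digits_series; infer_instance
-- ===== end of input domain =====

-- B replaces A's index-by-index walk (O(n)) with a direct loop over the power-of-two block
-- sizes (O(log n)); measured faster at the large sizes.

-- ===== PORT A =====
-- A's while loop, step for step; `fuel` only makes the recursion total (the top-level call
-- supplies more fuel than the loop can ever consume, proved in the equivalence proof).
-- idx is a local variable starting at 0 and only incremented, so it is carried as a Nat;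
-- `idx &&& (idx + 1)` is Python's `idx & (idx + 1)` on these nonnegative values.
def pvLoopA (n : Int) (fuel : Nat) (sum : Int) (idx : Nat) (count : Int) : Int :=
  match fuel with
  | 0 => sum
  | fuel + 1 =>
    if count < n then
      if idx &&& (idx + 1) == 0 then
        let s : Int := ((idx : Int) + 1) * 10 + 1
        let repeats : Int := min ((idx : Int) + 1) (n - count)
        pvLoopA n fuel (sum + s * repeats) (idx + 1) (count + repeats)
      else
        pvLoopA n fuel sum (idx + 1) count
    else sum

def squared_digits_series (n : Int) : Int :=
  pvLoopA n (2 * n.toNat + 2) 0 0 0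

-- ===== PORT B =====
-- B's while loop; the proof argument 0 < p only justifies termination (count strictly grows).
def pvLoopB (n : Int) (total count p : Int) (hp : 0 < p) : Int :=
  if h : count < n then
    let r : Int := min p (n - count)
    pvLoopB n (total + (10 * p + 1) * r) (count + r) (2 * p) (by omega)
  else total
termination_by (n - count).toNat
decreasing_by
  have h1 : (1 : Int) ≤ min p (n - count) := le_min (by omega) (by omega)
  simp only [] at *
  omega

def squared_digits_series_alt (n : Int) : Int :=
  pvLoopB n 0 0 1 (by norm_num)

-- ===== PRECONDITION & SPEC =====
def Spec_squared_digits_series (n : Int) (out : Int) : Prop := out = squared_digits_series_alt n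
instance (n : Int) (out : Int) : Decidable (Spec_squared_digits_series n out) := by unfold Spec_squared_digits_series; infer_instance

-- ===== CLAIM (what is proved, stated in full; the proofs are below) =====
def Claim_equal_squared_digits_series : Prop := ∀ (n : Int), Dom_squared_digits_series n → Spec_squared_digits_series n (squared_digits_series n)

-- ===== LEMMAS AND PROOFS =====

-- idx = 2^k - 1 is a block boundary: idx & (idx+1) == 0
lemma pv_boundary (k : Nat) : ((2 ^ k - 1) &&& 2 ^ k) = 0 := by
  apply Nat.eq_of_testBit_eq
  intro i
  simp [Nat.testBit_two_pow_sub_one, Nat.testBit_two_pow]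
  omega

lemma pv_testBit_of_between (k i : Nat) (h1 : 2 ^ k ≤ i) (h2 : i < 2 ^ (k + 1)) :
    i.testBit k = true := by
  have : i / 2 ^ k = 1 := Nat.div_eq_of_lt_le (by omega) (by rw [pow_succ] at h2; omega)
  simp [Nat.testBit, Nat.shiftRight_eq_div_pow, this]

-- indices strictly between two boundaries are not boundaries
lemma pv_not_boundary (k i : Nat) (h1 : 2 ^ k ≤ i) (h2 : i + 1 < 2 ^ (k + 1)) :
    i &&& (i + 1) ≠ 0 := by
  intro h
  have hb : (i &&& (i + 1)).testBit k = true := by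
    rw [Nat.testBit_land, pv_testBit_of_between k i h1 (by omega),
      pv_testBit_of_between k (i + 1) (by omega) h2]
    rfl
  rw [h, Nat.zero_testBit] at hb
  exact Bool.false_ne_true hb

-- walking A's loop over j consecutive non-boundary indices consumes j fuel and changes nothing else
lemma pv_walk (n : Int) (j : Nat) : ∀ (fuel : Nat) (sum c : Int) (idx : Nat),
    (∀ i, idx ≤ i → i < idx + j → i &&& (i + 1) ≠ 0) →
    pvLoopA n (fuel + j) sum idx c = pvLoopA n fuel sum (idx + j) c := by
  induction j with
  | zero => intro fuel sum c idx _; rfl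
  | succ j ih =>
    intro fuel sum c idx hnb
    have hstep : fuel + (j + 1) = (fuel + j) + 1 := by omega
    rw [hstep]
    by_cases hc : c < n
    · have hnbi : (idx &&& (idx + 1) == 0) = false := by
        simp [hnb idx (le_refl _) (by omega)]
      simp only [pvLoopA, if_pos hc, hnbi, Bool.false_eq_true, if_false]
      have := ih fuel sum c (idx + 1) (fun i h1 h2 => hnb i (by omega) (by omega))
      rw [this]
      congr 1
      omega
    · simp only [pvLoopA, if_neg hc]
      cases fuel with
      | zero => rfl
      | succ f => simp [pvLoopA, if_neg hc]

-- main invariant: at a boundary state (idx = 2^k - 1, count = 2^k - 1) with enough fuel,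
-- A's loop computes what B's loop computes from (count, p = 2^k)
lemma pv_main (n : Int) : ∀ (d k : Nat) (sum : Int) (fuel : Nat),
    d = (n - ((2 : Int) ^ k - 1)).toNat →
    2 * d + 2 ^ k ≤ fuel →
    pvLoopA n fuel sum (2 ^ k - 1) ((2 : Int) ^ k - 1)
      = pvLoopB n sum ((2 : Int) ^ k - 1) ((2 : Int) ^ k) (by positivity) := by
  intro d
  induction d using Nat.strong_induction_on with
  | _ d ih =>
    intro k sum fuel hd hfuel
    have hpk : (1 : Int) ≤ (2 : Int) ^ k := one_le_pow₀ (by norm_num)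
    have hpkN : 1 ≤ 2 ^ k := Nat.one_le_two_pow
    set c : Int := (2 : Int) ^ k - 1 with hc
    by_cases hcn : c < n
    · -- loop runs: d > 0, fuel ≥ 2 + 2^k ≥ 1
      have hd1 : 1 ≤ d := by omega
      obtain ⟨f, rfl⟩ : ∃ f, fuel = f + 1 := ⟨fuel - 1, by omega⟩
      have hcast : (((2 ^ k - 1 : Nat) : Int)) = c := by push_cast [hpkN]; ring
      have hbeq : ((2 ^ k - 1) &&& (2 ^ k - 1 + 1) == 0) = true := by
        have : 2 ^ k - 1 + 1 = 2 ^ k := by omega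
        rw [this, pv_boundary]; rfl
      rw [pvLoopB]
      rw [dif_pos hcn]
      set r : Int := min ((2 : Int) ^ k) (n - c) with hr
      have hr1 : 1 ≤ r := le_min (by omega) (by omega)
      simp only [pvLoopA, if_pos hcn, hbeq, if_pos]
      rw [hcast]
      have hsr : c + 1 = (2 : Int) ^ k := by omega
      rw [hsr]
      have hsum : sum + ((2 : Int) ^ k * 10 + 1) * min ((2 : Int) ^ k) (n - c)
          = sum + (10 * (2 : Int) ^ k + 1) * r := by rw [← hr]; ring
      rw [hsum]
      by_cases hfin : c + r < n
      · -- block fully consumed: r = 2^k, next boundary is 2^(k+1) - 1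
        have hrfull : r = (2 : Int) ^ k := by
          rcases min_cases ((2 : Int) ^ k) (n - c) with ⟨h1, _⟩ | ⟨h1, h2⟩
          · omega
          · omega
        have hcr : c + r = (2 : Int) ^ (k + 1) - 1 := by
          rw [hrfull, hc]; ring
        rw [hcr]
        have hidxs : 2 ^ k - 1 + 1 = 2 ^ k := by omega
        rw [hidxs]
        -- walk the 2^k - 1 non-boundary indices from 2^k to 2^(k+1) - 2
        have hfw : f = (f - (2 ^ k - 1)) + (2 ^ k - 1) := by
          have : 2 ^ k ≤ f + 1 := le_trans (by omega) hfuel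
          omega
        rw [hfw, pv_walk n (2 ^ k - 1) (f - (2 ^ k - 1)) _ _ (2 ^ k)
          (by
            intro i hi1 hi2
            apply pv_not_boundary k i hi1
            have : 2 ^ (k + 1) = 2 * 2 ^ k := by ring
            omega)]
        have hidx : 2 ^ k + (2 ^ k - 1) = 2 ^ (k + 1) - 1 := by
          have : 2 ^ (k + 1) = 2 * 2 ^ k := by ring
          omega
        rw [hidx]
        -- apply IH at k+1
        have hd' : (n - ((2 : Int) ^ (k + 1) - 1)).toNat = d - 2 ^ k := by
          have h2 : ((2 : Int) ^ (k + 1)) = 2 * 2 ^ k := by ring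
          have h3 : ((2 ^ k : Nat) : Int) = (2 : Int) ^ k := by push_cast; ring
          omega
        have hlt : d - 2 ^ k < d := by
          have : (2 : Int) ^ k < n - c := by omega
          omega
        have hfuel' : 2 * (d - 2 ^ k) + 2 ^ (k + 1) ≤ f - (2 ^ k - 1) := by
          have hp2 : 2 ^ (k + 1) = 2 * 2 ^ k := by ring
          have : (2 : Int) ^ k < n - c := by omega
          have hdge : 2 ^ k ≤ d := by
            have h3 : ((2 ^ k : Nat) : Int) = (2 : Int) ^ k := by push_cast; ring
            omega
          omega
        have := ih (d - 2 ^ k) hlt (k + 1) (sum + (10 * (2 : Int) ^ k + 1) * r)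
          (f - (2 ^ k - 1)) hd'.symm hfuel'
        rw [this]
        congr 1
        ring
      · -- loop about to end on both sides: count + r ≥ n
        have hf1 : 1 ≤ f := by omega
        obtain ⟨f', rfl⟩ : ∃ f', f = f' + 1 := ⟨f - 1, by omega⟩
        rw [pvLoopB, dif_neg (by omega)]
        simp only [pvLoopA]
        rw [← hr, if_neg hfin]
    · -- loop never runs
      obtain ⟨f, rfl⟩ : ∃ f, fuel = f + 1 := ⟨fuel - 1, by omega⟩
      rw [pvLoopB, dif_neg hcn]
      simp only [pvLoopA, if_neg hcn]

-- ===== VERDICT (by name: the statement is the Claim_ definition above) =====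
theorem squared_digits_series_spec : Claim_equal_squared_digits_series := by
  intro n _
  unfold Spec_squared_digits_series squared_digits_series squared_digits_series_alt
  have h := pv_main n n.toNat 0 0 (2 * n.toNat + 2) (by simp) (by norm_num)
  simpa using h
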